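-- pv_equiv track=rewrite | github.com/ShinUngJae/programmers | programmers/Python/level 0/외계어 사전.py | solution
-- ===== SOURCE A (Python) =====
-- def solution(spell, dic):
--     for i in dic :
--         temp = 0
--         for j in spell :
--             if j in i :
--                 temp += 1
--         if temp == len(spell) :
--             return 1
--     return 2
-- ===== SOURCE B (Python) =====
-- def solution(spell, dic):
--     candidates = set(range(len(dic)))
--     for c in spell:
--         candidates &= {i for i, word in enumerate(dic) if c in word}
--     return 1 if candidates else 2
-- ===== Notes on version B (the rewrite author's own statement) =====
-- stated objective: alternative
-- what changed: Instead of scanning each word and counting how many spell entries it contains, B maintains a shrinking set of candidate word indices and intersects it with the matching indices for each spell entry; the answer is whether any candidate survives.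
import Mathlib
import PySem

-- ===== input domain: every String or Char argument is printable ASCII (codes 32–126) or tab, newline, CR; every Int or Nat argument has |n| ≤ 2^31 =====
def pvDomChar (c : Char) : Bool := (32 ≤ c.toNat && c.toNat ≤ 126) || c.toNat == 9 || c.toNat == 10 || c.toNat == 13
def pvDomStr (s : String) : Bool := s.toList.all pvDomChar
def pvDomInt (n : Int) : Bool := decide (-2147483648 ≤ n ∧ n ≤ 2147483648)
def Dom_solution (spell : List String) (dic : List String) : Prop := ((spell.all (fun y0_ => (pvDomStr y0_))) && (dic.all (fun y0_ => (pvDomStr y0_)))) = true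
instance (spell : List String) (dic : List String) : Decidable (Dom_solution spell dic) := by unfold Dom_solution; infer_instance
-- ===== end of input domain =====

-- B replaces A's per-word counting loop with a shrinking candidate-index set intersected per spell entry (alternative decomposition).

-- ===== PORT A =====
-- for i in dic: temp = count of j in spell with j in i; if temp == len(spell): return 1; ... return 2
def solution (spell : List String) (dic : List String) : Int :=
  match dic with
  | [] => 2
  | i :: rest =>
    let temp : Int := spell.foldl (fun acc j => if PySem.Str.isIn j i then acc + 1 else acc) 0
    if temp = (spell.length : Int) then 1 else solution spell rest

-- ===== PORT B =====
-- candidates = set(range(len(dic))); for c in spell: candidates &= {i for i, word in enumerate(dic) if c in word}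
def solution_alt (spell : List String) (dic : List String) : Int :=
  let init : PySem.Set Int := PySem.Set.ofList (PySem.List.pyRange 0 (dic.length : Int) 1)
  let cands : PySem.Set Int := spell.foldl
    (fun cs c => PySem.Set.inter cs
      (PySem.Set.ofList ((PySem.List.enumerate dic 0).filterMap
        (fun p => if PySem.Str.isIn c p.2 then some p.1 else none)))) init
  if cands = [] then 2 else 1

-- ===== PRECONDITION & SPEC =====
def Spec_solution (spell : List String) (dic : List String) (out : Int) : Prop := out = solution_alt spell dic
instance (spell : List String) (dic : List String) (out : Int) : Decidable (Spec_solution spell dic out) := by unfold Spec_solution; infer_instance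

-- ===== CLAIM (what is proved, stated in full; the proofs are below) =====
def Claim_equal_solution : Prop := ∀ (spell : List String) (dic : List String), Dom_solution spell dic → Spec_solution spell dic (solution spell dic)

-- ===== LEMMAS AND PROOFS =====

-- A's inner counting loop is countP
theorem count_foldl (spell : List String) (i : String) (a : Int) :
    spell.foldl (fun acc j => if PySem.Str.isIn j i then acc + 1 else acc) a
      = a + (spell.countP (fun j => PySem.Str.isIn j i) : Int) := by
  induction spell generalizing a with
  | nil => simp
  | cons x xs ih =>
    simp only [List.foldl_cons, List.countP_cons, ih]
    split_ifs with h <;> push_cast <;> ring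

-- A returns 1 iff some word contains every spell entry, else 2
theorem solution_eq_ite (spell : List String) (dic : List String) :
    solution spell dic =
      if ∃ w ∈ dic, ∀ j ∈ spell, PySem.Str.isIn j w = true then 1 else 2 := by
  induction dic with
  | nil => simp [solution]
  | cons i rest ih =>
    simp only [solution, count_foldl, zero_add]
    have hc : ((spell.countP (fun j => PySem.Str.isIn j i) : Int) = (spell.length : Int))
        ↔ ∀ j ∈ spell, PySem.Str.isIn j i = true := by
      rw [Int.ofNat_inj]
      exact List.countP_eq_length
    by_cases h : ∀ j ∈ spell, PySem.Str.isIn j i = true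
    · rw [if_pos (hc.mpr h), if_pos ⟨i, by simp, h⟩]
    · rw [if_neg (fun hcnt => h (hc.mp hcnt)), ih]
      by_cases h2 : ∃ w ∈ rest, ∀ j ∈ spell, PySem.Str.isIn j w = true
      · rw [if_pos h2, if_pos]
        obtain ⟨w, hw, hall⟩ := h2
        exact ⟨w, List.mem_cons_of_mem _ hw, hall⟩
      · rw [if_neg h2, if_neg]
        rintro ⟨w, hw, hall⟩
        rcases List.mem_cons.mp hw with rfl | hw'
        · exact h hall
        · exact h2 ⟨w, hw', hall⟩

-- membership in the per-entry index set
theorem mem_matchSet (dic : List String) (c : String) (k : Int) :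
    k ∈ PySem.Set.ofList ((PySem.List.enumerate dic 0).filterMap
        (fun p => if PySem.Str.isIn c p.2 then some p.1 else none))
      ↔ ∃ (n : Nat) (h : n < dic.length), k = (n : Int) ∧ PySem.Str.isIn c dic[n] = true := by
  rw [PySem.Set.mem_ofList, List.mem_filterMap]
  constructor
  · rintro ⟨p, hp, hsel⟩
    obtain ⟨n, hn, rfl⟩ := (PySem.List.mem_enumerate_iff _ _ _).mp hp
    split_ifs at hsel with h
    · refine ⟨n, hn, ?_, h⟩
      simp only [Option.some.injEq] at hsel
      omega
  · rintro ⟨n, hn, rfl, h⟩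
    refine ⟨((0 : Int) + n, dic[n]), (PySem.List.mem_enumerate_iff _ _ _).mpr ⟨n, hn, rfl⟩, ?_⟩
    rw [if_pos h]
    norm_num

-- membership invariant of B's intersection fold
theorem mem_foldl_inter (spell : List String) (S : String → PySem.Set Int)
    (init : PySem.Set Int) (k : Int) :
    k ∈ spell.foldl (fun cs c => PySem.Set.inter cs (S c)) init
      ↔ k ∈ init ∧ ∀ c ∈ spell, k ∈ S c := by
  induction spell generalizing init with
  | nil => simp
  | cons c cs ih =>
    simp only [List.foldl_cons, ih, PySem.Set.mem_inter, List.mem_cons]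
    constructor
    · rintro ⟨⟨h1, h2⟩, h3⟩
      exact ⟨h1, fun x hx => by rcases hx with rfl | hx; exact h2; exact h3 x hx⟩
    · rintro ⟨h1, h2⟩
      exact ⟨⟨h1, h2 c (Or.inl rfl)⟩, fun x hx => h2 x (Or.inr hx)⟩

theorem solution_alt_eq_ite (spell : List String) (dic : List String) :
    solution_alt spell dic =
      if ∃ w ∈ dic, ∀ j ∈ spell, PySem.Str.isIn j w = true then 1 else 2 := by
  unfold solution_alt
  have hchar : ∀ k : Int,
      (k ∈ spell.foldl (fun cs c => PySem.Set.inter cs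
          (PySem.Set.ofList ((PySem.List.enumerate dic 0).filterMap
            (fun p => if PySem.Str.isIn c p.2 then some p.1 else none))))
          (PySem.Set.ofList (PySem.List.pyRange 0 (dic.length : Int) 1)))
        ↔ k ∈ PySem.Set.ofList (PySem.List.pyRange 0 (dic.length : Int) 1)
            ∧ ∀ c ∈ spell, k ∈ PySem.Set.ofList ((PySem.List.enumerate dic 0).filterMap
                (fun p => if PySem.Str.isIn c p.2 then some p.1 else none)) := by
    intro k
    exact mem_foldl_inter spell _ _ k
  by_cases h : ∃ w ∈ dic, ∀ j ∈ spell, PySem.Str.isIn j w = true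
  · rw [if_pos h]
    obtain ⟨w, hw, hall⟩ := h
    obtain ⟨n, hn, rfl⟩ := List.mem_iff_getElem.mp hw
    have hk : (n : Int) ∈ spell.foldl (fun cs c => PySem.Set.inter cs
          (PySem.Set.ofList ((PySem.List.enumerate dic 0).filterMap
            (fun p => if PySem.Str.isIn c p.2 then some p.1 else none))))
          (PySem.Set.ofList (PySem.List.pyRange 0 (dic.length : Int) 1)) := by
      rw [hchar]
      constructor
      · rw [PySem.Set.mem_ofList, PySem.List.mem_pyRange_one]
        omega
      · intro c hc
        exact (mem_matchSet dic c _).mpr ⟨n, hn, rfl, hall c hc⟩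
    simp only []
    rw [if_neg]
    intro hnil
    rw [hnil] at hk
    exact absurd hk (List.not_mem_nil)
  · rw [if_neg h]
    simp only []
    rw [if_pos]
    by_contra hne
    obtain ⟨k, hk⟩ := List.exists_mem_of_ne_nil _ hne
    rw [hchar] at hk
    obtain ⟨hk1, hk2⟩ := hk
    rw [PySem.Set.mem_ofList, PySem.List.mem_pyRange_one] at hk1
    obtain ⟨n, rfl⟩ : ∃ n : Nat, k = (n : Int) := ⟨k.toNat, by omega⟩
    have hn : n < dic.length := by exact_mod_cast hk1.2
    apply h
    refine ⟨dic[n], List.getElem_mem hn, fun j hj => ?_⟩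
    obtain ⟨m, hm, he, hin⟩ := (mem_matchSet dic j _).mp (hk2 j hj)
    have : m = n := by omega
    subst this
    exact hin

-- ===== VERDICT (by name: the statement is the Claim_ definition above) =====
theorem solution_spec : Claim_equal_solution := by
  intro spell dic _
  unfold Spec_solution
  rw [solution_eq_ite, solution_alt_eq_ite]
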